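-- pv_equiv track=rewrite | github.com/Codeway-js/tarot_server | test.py | cdir
-- ===== SOURCE A (Python) =====
-- def cdir(m):
--     nb1=0
--     streak1=True
--     for el in m:
--         if el == 1:
--             if streak1==False:
--                 return -1
--             nb1+=1
--         else:
--             streak1=False
--     return nb1
-- ===== SOURCE B (Python) =====
-- def cdir(m):
--     lead = 0
--     for x in m:
--         if x != 1:
--             break
--         lead += 1
--     if 1 in m[lead:]:
--         return -1
--     return lead
-- ===== Notes on version B (the rewrite author's own statement) =====
-- stated objective: simpler
-- what changed: Replaced A's single flag-driven loop (streak1 boolean with in-loop early return) by a two-phase decomposition: first measure the leading run of 1s, then a plain membership test for 1 in the tail.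
import Mathlib
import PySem

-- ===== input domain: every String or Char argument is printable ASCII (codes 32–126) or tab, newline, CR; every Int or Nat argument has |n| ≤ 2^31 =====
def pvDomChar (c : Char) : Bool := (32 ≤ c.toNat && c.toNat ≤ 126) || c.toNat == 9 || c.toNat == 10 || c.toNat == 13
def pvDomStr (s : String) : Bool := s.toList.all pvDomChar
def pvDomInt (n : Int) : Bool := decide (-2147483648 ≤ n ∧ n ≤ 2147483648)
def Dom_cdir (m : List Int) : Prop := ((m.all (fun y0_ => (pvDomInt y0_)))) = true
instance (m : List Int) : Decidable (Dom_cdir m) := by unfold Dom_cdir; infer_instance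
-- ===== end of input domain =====

-- B replaces A's single flag-driven loop by two phases (leading-run length, then tail membership); objective: simpler.

-- ===== PORT A =====
-- A's loop, step for step: nb1 counter, streak1 flag, early return -1 on a 1 after the streak broke
def cdirLoop : List Int → Int → Bool → Int
  | [], nb1, _ => nb1
  | el :: rest, nb1, streak1 =>
    if el = 1 then
      if streak1 = false then -1
      else cdirLoop rest (nb1 + 1) streak1
    else cdirLoop rest nb1 false

def cdir (m : List Int) : Int := cdirLoop m 0 true

-- ===== PORT B =====
-- Source B's first for-loop: count leading 1s, break at the first non-1
def leadOnes : List Int → Nat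
  | [] => 0
  | x :: r => if x ≠ 1 then 0 else leadOnes r + 1

def cdir_alt (m : List Int) : Int :=
  let lead := leadOnes m
  if (m.drop lead).contains 1 then -1 else (lead : Int)

-- ===== PRECONDITION & SPEC =====
def Spec_cdir (m : List Int) (out : Int) : Prop := out = cdir_alt m
instance (m : List Int) (out : Int) : Decidable (Spec_cdir m out) := by unfold Spec_cdir; infer_instance

-- ===== CLAIM (what is proved, stated in full; the proofs are below) =====
def Claim_equal_cdir : Prop := ∀ (m : List Int), Dom_cdir m → Spec_cdir m (cdir m)

-- ===== LEMMAS AND PROOFS =====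
theorem cdirLoop_false (m : List Int) (nb1 : Int) :
    cdirLoop m nb1 false = if m.contains 1 then -1 else nb1 := by
  induction m with
  | nil => simp [cdirLoop]
  | cons el rest ih =>
    by_cases h : el = 1
    · simp [cdirLoop, h]
    · have h1 : ¬((1 : Int) = el) := fun e => h e.symm
      simp [cdirLoop, h, h1, ih]

theorem cdirLoop_true (m : List Int) (nb1 : Int) :
    cdirLoop m nb1 true =
      if (m.drop (leadOnes m)).contains 1 then -1 else nb1 + (leadOnes m : Int) := by
  induction m generalizing nb1 with
  | nil => simp [cdirLoop, leadOnes]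
  | cons el rest ih =>
    by_cases h : el = 1
    · subst h
      rw [show cdirLoop (1 :: rest) nb1 true = cdirLoop rest (nb1 + 1) true from by
        simp [cdirLoop]]
      rw [ih, show leadOnes (1 :: rest) = leadOnes rest + 1 from by simp [leadOnes]]
      simp only [List.drop_succ_cons]
      split
      · rfl
      · push_cast; ring
    · have h1 : ¬((1 : Int) = el) := fun e => h e.symm
      simp [cdirLoop, h, h1, leadOnes, cdirLoop_false]

-- ===== VERDICT (by name: the statement is the Claim_ definition above) =====
theorem cdir_spec : Claim_equal_cdir := by
  intro m _
  unfold Spec_cdir cdir cdir_alt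
  rw [cdirLoop_true]
  simp
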